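-- pv_equiv track=rewrite | github.com/981377660LMT/algorithm-study | 11_动态规划/经典题/dfs+cache/Decode List Message.py | solve
-- ===== SOURCE A (Python) =====
-- from functools import lru_cache
--
-- MOD = int(1e9 + 7)
--
-- def solve(s: str, k: int) -> int:
--     @lru_cache(None)
--     def dfs(index: int) -> int:
--         if index >= n:
--             return 1
--
--         res = 0
--         curNum = 0
--         j = index
--         while j < n:
--             curNum = curNum * 10 + int(s[j])
--             if 1 <= curNum <= k:
--                 res += dfs(j + 1)
--                 res %= MOD
--             else:
--                 break
--             j += 1
--
--         return res % MOD
--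
--     n = len(s)
--     res = dfs(0)
--     dfs.cache_clear()
--     return res
-- ===== SOURCE B (Python) =====
-- MOD = int(1e9 + 7)
--
-- def solve(s: str, k: int) -> int:
--     digits = [int(c) for c in s]
--     n = len(digits)
--     dp = [0] * (n + 1)
--     dp[n] = 1
--     for i in range(n - 1, -1, -1):
--         cur = 0
--         res = 0
--         for j in range(i, n):
--             cur = cur * 10 + digits[j]
--             if 1 <= cur <= k:
--                 res = (res + dp[j + 1]) % MOD
--             else:
--                 break
--         dp[i] = res
--     return dp[0]
-- ===== Notes on version B (the rewrite author's own statement) =====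
-- stated objective: alternative
-- what changed: Replaces the memoized top-down recursion (lru_cache dfs with a while-loop scan) by an iterative bottom-up DP that fills an array dp[0..n] from the back, each cell computed by the same bounded prefix scan reading dp[j+1].
-- outside the precondition, e.g. on solve('0x', 9): A returns 0, B raises ValueError; on solve('2!', 1): A returns 0, B raises ValueError
import Mathlib
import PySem

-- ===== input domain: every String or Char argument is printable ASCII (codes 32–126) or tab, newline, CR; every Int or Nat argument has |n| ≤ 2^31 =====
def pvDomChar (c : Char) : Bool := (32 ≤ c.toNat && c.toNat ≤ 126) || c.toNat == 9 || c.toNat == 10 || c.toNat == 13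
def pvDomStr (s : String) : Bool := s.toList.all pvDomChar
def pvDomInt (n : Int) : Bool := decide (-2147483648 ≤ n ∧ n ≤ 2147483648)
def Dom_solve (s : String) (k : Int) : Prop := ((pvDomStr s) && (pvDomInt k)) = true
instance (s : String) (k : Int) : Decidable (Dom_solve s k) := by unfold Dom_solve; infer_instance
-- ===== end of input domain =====

-- B replaces A's memoized top-down recursion by an iterative bottom-up DP over an array dp[0..n]
-- filled back to front (objective: alternative; same asymptotic cost).

-- ===== PORT A =====
-- int(c) for a single digit character; exact on the digit strings admitted by Pre_solve
def pyDigit (c : Char) : Int := (c.toNat : Int) - 48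

-- A's inner `dfs` (the lru_cache is a pure memoization of a deterministic function, so the
-- transliteration is the same recursion without the cache) and its `while` loop.
-- `fuel` is only a totality guard; 2*n+1 always suffices (proved by the fuel lemmas below).
mutual
def dfsA (ds : List Int) (k : Int) : Nat → Nat → Int
  | 0, _ => 0
  | fuel+1, index =>
    if ds.length ≤ index then 1
    else (loopA ds k fuel index 0 0) % 1000000007

def loopA (ds : List Int) (k : Int) : Nat → Nat → Int → Int → Int
  | 0, _, _, res => res
  | fuel+1, j, curNum, res =>
    if j < ds.length then
      let cur := curNum * 10 + ds.getD j 0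
      if 1 ≤ cur ∧ cur ≤ k then
        loopA ds k fuel (j+1) cur ((res + dfsA ds k fuel (j+1)) % 1000000007)
      else res
    else res
end

def solve (s : String) (k : Int) : Int :=
  let ds := s.toList.map pyDigit
  dfsA ds k (2 * ds.length + 1) 0

-- ===== PORT B =====
-- Source B's inner `for j in range(i, n)` loop with its break
def innerB (ds : List Int) (k : Int) (dp : List Int) (j : Nat) (curNum res : Int) : Int :=
  if _h : j < ds.length then
    let cur := curNum * 10 + ds.getD j 0
    if 1 ≤ cur ∧ cur ≤ k then
      innerB ds k dp (j+1) cur ((res + dp.getD (j+1) 0) % 1000000007)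
    else res
  else res
termination_by ds.length - j
decreasing_by omega

-- Source B's outer `for i in range(n-1, -1, -1)` loop; counter c+1 processes index i = c
def outerB (ds : List Int) (k : Int) : Nat → List Int → List Int
  | 0, dp => dp
  | c+1, dp => outerB ds k c (dp.set c (innerB ds k dp c 0 0))

def solve_alt (s : String) (k : Int) : Int :=
  let ds := s.toList.map pyDigit
  (outerB ds k ds.length ((List.replicate (ds.length + 1) 0).set ds.length 1)).getD 0 0

-- ===== PRECONDITION & SPEC =====
-- Pre_ excludes strings containing a non-digit character: A raises ValueError as soon as its lazy
-- scan reaches one (and returns 0 on the few where it breaks before reaching it), while B converts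
-- all characters up front and raises ValueError on any of them.
def Pre_solve (s : String) (_k : Int) : Prop := s.toList.all Char.isDigit = true
instance (s : String) (k : Int) : Decidable (Pre_solve s k) := by unfold Pre_solve; infer_instance

def pvWitness_solve : String × Int := ("1213", 25)

def Spec_solve (s : String) (k : Int) (out : Int) : Prop := out = solve_alt s k
instance (s : String) (k : Int) (out : Int) : Decidable (Spec_solve s k out) := by unfold Spec_solve; infer_instance

-- ===== CLAIM (what is proved, stated in full; the proofs are below) =====
def Claim_equal_solve : Prop := ∀ (s : String) (k : Int), Dom_solve s k → Pre_solve s k → Spec_solve s k (solve s k)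

-- ===== LEMMAS AND PROOFS =====

-- canonical value of A's dfs at an index (fuel 2n+1 always suffices)
def FA (ds : List Int) (k : Int) (index : Nat) : Int := dfsA ds k (2 * ds.length + 1) index

-- B's dp array after the outer loop has processed indices c..n-1
def MB (ds : List Int) (k : Int) (c : Nat) : List Int :=
  (List.range (ds.length + 1)).map (fun t => if c ≤ t then FA ds k t else 0)

-- fuel irrelevance for A's pair of recursions
theorem fuel_eq (ds : List Int) (k : Int) : ∀ (f : Nat),
    (∀ (g index : Nat), 2*(ds.length - index) < f → 2*(ds.length - index) < g →
      dfsA ds k f index = dfsA ds k g index) ∧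
    (∀ (g j : Nat) (c r : Int), 2*(ds.length - j) ≤ f → 2*(ds.length - j) ≤ g →
      loopA ds k f j c r = loopA ds k g j c r) := by
  intro f
  induction f with
  | zero =>
    refine ⟨fun g index h _ => absurd h (Nat.not_lt_zero _), fun g j c r hf hg => ?_⟩
    have hj : ¬ j < ds.length := by omega
    cases g with
    | zero => rfl
    | succ g' => simp [loopA, hj]
  | succ f ih =>
    constructor
    · intro g index hf hg
      obtain ⟨g', rfl⟩ : ∃ g', g = g'+1 := ⟨g-1, by omega⟩
      by_cases hi : ds.length ≤ index
      · simp [dfsA, hi]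
      · simp only [dfsA, if_neg hi]
        rw [ih.2 g' index 0 0 (by omega) (by omega)]
    · intro g j c r hf hg
      by_cases hj : j < ds.length
      · obtain ⟨g', rfl⟩ : ∃ g', g = g'+1 := ⟨g-1, by omega⟩
        simp only [loopA, if_pos hj]
        by_cases hc : 1 ≤ c * 10 + ds.getD j 0 ∧ c * 10 + ds.getD j 0 ≤ k
        · simp only [if_pos hc]
          rw [ih.1 g' (j+1) (by omega) (by omega)]
          exact ih.2 g' (j+1) _ _ (by omega) (by omega)
        · simp only [if_neg hc]
      · cases g with
        | zero => cases f <;> simp [loopA, hj]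
        | succ g' => simp [loopA, hj]

theorem MB_getD (ds : List Int) (k : Int) (m t : Nat) (h1 : m ≤ t) (h2 : t < ds.length + 1) :
    (MB ds k m).getD t 0 = FA ds k t := by
  simp [MB, List.getD_eq_getElem?_getD, h2, h1]

theorem inner_eq (ds : List Int) (k : Int) (m : Nat) :
    ∀ (d j : Nat) (c r : Int) (f : Nat), ds.length - j ≤ d → m ≤ j + 1 → 2*(ds.length - j) ≤ f →
      innerB ds k (MB ds k m) j c r = loopA ds k f j c r := by
  intro d
  induction d with
  | zero =>
    intro j c r f hd _ _
    have hj : ¬ j < ds.length := by omega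
    rw [innerB]
    cases f with
    | zero => simp [loopA, hj]
    | succ f' => simp [loopA, hj]
  | succ d ih =>
    intro j c r f hd hm hf
    by_cases hj : j < ds.length
    · obtain ⟨f', rfl⟩ : ∃ f', f = f'+1 := ⟨f-1, by omega⟩
      rw [innerB]
      simp only [loopA, dif_pos hj, if_pos hj]
      by_cases hc : 1 ≤ c * 10 + ds.getD j 0 ∧ c * 10 + ds.getD j 0 ≤ k
      · simp only [if_pos hc]
        rw [MB_getD ds k m (j+1) (by omega) (by omega)]
        rw [show dfsA ds k f' (j+1) = FA ds k (j+1) from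
          (fuel_eq ds k f').1 (2 * ds.length + 1) (j+1) (by omega) (by omega)]
        exact ih (j+1) _ _ f' (by omega) (by omega) (by omega)
      · simp only [if_neg hc]
    · rw [innerB]
      cases f with
      | zero => simp [loopA, hj]
      | succ f' => simp [loopA, hj]

theorem inner_range (ds : List Int) (k : Int) (dp : List Int) :
    ∀ (d j : Nat) (c r : Int), ds.length - j ≤ d → 0 ≤ r → r < 1000000007 →
      0 ≤ innerB ds k dp j c r ∧ innerB ds k dp j c r < 1000000007 := by
  intro d
  induction d with
  | zero =>
    intro j c r hd h0 h1
    have hj : ¬ j < ds.length := by omega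
    rw [innerB]; simp [hj]; omega
  | succ d ih =>
    intro j c r hd h0 h1
    by_cases hj : j < ds.length
    · rw [innerB]
      simp only [dif_pos hj]
      by_cases hc : 1 ≤ c * 10 + ds.getD j 0 ∧ c * 10 + ds.getD j 0 ≤ k
      · simp only [if_pos hc]
        exact ih (j+1) _ _ (by omega)
          (Int.emod_nonneg _ (by norm_num)) (Int.emod_lt_of_pos _ (by norm_num))
      · simp only [if_neg hc]; omega
    · rw [innerB]; simp [hj]; omega

theorem stored_eq (ds : List Int) (k : Int) (i : Nat) (hi : i < ds.length) :
    innerB ds k (MB ds k (i+1)) i 0 0 = FA ds k i := by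
  have h1 : FA ds k i = (loopA ds k (2 * ds.length) i 0 0) % 1000000007 := by
    have : ¬ ds.length ≤ i := by omega
    simp [FA, dfsA, this]
  have h2 : loopA ds k (2 * ds.length) i 0 0 = innerB ds k (MB ds k (i+1)) i 0 0 :=
    (inner_eq ds k (i+1) ds.length i 0 0 (2 * ds.length) (by omega) (by omega) (by omega)).symm
  have h3 := inner_range ds k (MB ds k (i+1)) ds.length i 0 0 (by omega) (by norm_num) (by norm_num)
  rw [h1, h2, Int.emod_eq_of_lt h3.1 h3.2]

theorem MB_set (ds : List Int) (k : Int) (i : Nat) (hi : i < ds.length) :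
    (MB ds k (i+1)).set i (FA ds k i) = MB ds k i := by
  apply List.ext_getElem
  · simp [MB]
  · intro t h1 h2
    have ht : t < ds.length + 1 := by simpa [MB] using h2
    simp only [MB, List.getElem_set, List.getElem_map, List.getElem_range]
    split_ifs <;> first | rfl | omega | (subst_vars; rfl)

theorem outer_inv (ds : List Int) (k : Int) : ∀ (c : Nat), c ≤ ds.length →
    outerB ds k c (MB ds k c) = MB ds k 0 := by
  intro c
  induction c with
  | zero => intro _; rfl
  | succ c ih =>
    intro hc
    show outerB ds k c ((MB ds k (c+1)).set c (innerB ds k (MB ds k (c+1)) c 0 0)) = MB ds k 0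
    rw [stored_eq ds k c (by omega), MB_set ds k c (by omega)]
    exact ih (by omega)

theorem init_eq (ds : List Int) (k : Int) :
    (List.replicate (ds.length + 1) 0).set ds.length 1 = MB ds k ds.length := by
  have hFA : FA ds k ds.length = 1 := by simp [FA, dfsA]
  apply List.ext_getElem
  · simp [MB]
  · intro t h1 h2
    have ht : t < ds.length + 1 := by simpa using h1
    simp only [MB, List.getElem_set, List.getElem_replicate, List.getElem_map, List.getElem_range]
    split_ifs <;> first | rfl | omega | (subst_vars; exact hFA.symm)

-- ===== VERDICT (by name: the statement is the Claim_ definition above) =====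
theorem solve_spec : Claim_equal_solve := by
  intro s k _ _
  show solve s k = solve_alt s k
  simp only [solve, solve_alt]
  rw [init_eq (s.toList.map pyDigit) k, outer_inv (s.toList.map pyDigit) k _ (le_refl _),
    MB_getD (s.toList.map pyDigit) k 0 0 (by omega) (by omega)]
  rfl
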